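-- pv_equiv track=rewrite | github.com/Parkhb1106/Telco-RAG | Telco-RAG_api/src/get_definitions.py | find_and_filter_abbreviations
-- ===== SOURCE A (Python) =====
-- def preprocess(text, lowercase=True):
--     """Converts text to lowercase and removes punctuation."""
--     if lowercase:
--         text = text.lower()
--     punctuations = '''!()-[]{};:'"\,<>./?@#$%^&*_~'''
--     for char in punctuations:
--         text = text.replace(char, '')
--     return text
--
-- def find_and_filter_abbreviations(abbreviations_dict, sentence):
--     """Finds abbreviations in the given sentence, case-sensitively, and filters out shorter overlapping abbreviations."""
--     processed_sentence = preprocess(sentence, lowercase=False)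
--     words = processed_sentence.split()
--
--     matched_abbreviations = {word: abbreviations_dict[word] for word in words if word in abbreviations_dict}
--
--     final_abbreviations = {}
--     sorted_abbrs = sorted(matched_abbreviations, key=len, reverse=True)
--     for abbr in sorted_abbrs:
--         if not any(abbr in other and abbr != other for other in sorted_abbrs):
--             final_abbreviations[abbr] = matched_abbreviations[abbr]
--
--     return final_abbreviations
-- ===== SOURCE B (Python) =====
-- def find_and_filter_abbreviations(abbreviations_dict, sentence):
--     """Same result as A: single-pass punctuation strip, then a maximal-element
--     sweep over the length-sorted matched abbreviations (checks only against
--     already-kept longer ones instead of all pairs)."""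
--     words = sentence.translate(str.maketrans('', '', '''!()-[]{};:'"\,<>./?@#$%^&*_~''')).split()
--     cands = list(dict.fromkeys(w for w in words if w in abbreviations_dict))
--     cands.sort(key=len, reverse=True)
--     kept = []
--     for a in cands:
--         if not any(len(b) > len(a) and a in b for b in kept):
--             kept.append(a)
--     return {a: abbreviations_dict[a] for a in kept}
-- ===== Notes on version B (the rewrite author's own statement) =====
-- stated objective: alternative
-- what changed: B strips punctuation with one translate pass (instead of one full replace pass per punctuation character) and filters non-maximal abbreviations by a sweep over the length-sorted candidates that tests each candidate only against the already-kept longer maximal ones, instead of A's scan of every candidate against all other matched ones.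
import Mathlib
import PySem

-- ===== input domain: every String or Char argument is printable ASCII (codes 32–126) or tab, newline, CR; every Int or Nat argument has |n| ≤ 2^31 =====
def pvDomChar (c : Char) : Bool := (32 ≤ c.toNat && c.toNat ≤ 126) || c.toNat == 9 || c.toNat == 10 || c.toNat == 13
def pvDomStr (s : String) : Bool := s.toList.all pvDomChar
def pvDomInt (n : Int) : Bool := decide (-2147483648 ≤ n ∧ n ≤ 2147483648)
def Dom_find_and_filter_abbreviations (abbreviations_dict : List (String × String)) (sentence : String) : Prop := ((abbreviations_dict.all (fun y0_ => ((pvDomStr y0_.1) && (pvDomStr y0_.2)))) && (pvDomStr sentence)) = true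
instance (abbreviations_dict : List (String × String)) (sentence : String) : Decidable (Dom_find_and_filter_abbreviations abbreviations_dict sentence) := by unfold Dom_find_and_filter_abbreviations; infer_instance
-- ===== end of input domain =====

-- B strips punctuation in one pass over the sentence (instead of one full replace pass per punctuation
-- character) and keeps only maximal matched abbreviations by a sweep over the length-sorted candidates
-- that compares each candidate against the already-kept longer ones only (instead of testing every pair);
-- same return value as A.

-- ===== PORT A =====
def pvPunctA : List Char :=
  ['!','(',')','-','[',']','{','}',';',':','\'','"','\\',',','<','>','.','/','?','@','#','$','%','^','&','*','_','~']

def pvPreprocess (text : String) (lowercase : Bool) : String :=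
  let text := if lowercase then PySem.Str.lower text else text
  pvPunctA.foldl (fun t c => PySem.Str.replace t (String.ofList [c]) "") text

def find_and_filter_abbreviations (abbreviations_dict : List (String × String)) (sentence : String) : List (String × String) :=
  let D : PySem.Dict String String := ⟨abbreviations_dict⟩
  let processed := pvPreprocess sentence false
  let words := PySem.Str.split₀ processed
  let matched : PySem.Dict String String :=
    words.foldl (fun m w => match D.get? w with | some v => m.insert w v | none => m) PySem.Dict.empty
  let sorted_abbrs := PySem.List.sorted matched.keys PySem.Str.len true
  let final : PySem.Dict String String :=
    sorted_abbrs.foldl (fun f abbr =>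
      if sorted_abbrs.any (fun other => PySem.Str.isIn abbr other && abbr != other) then f
      else f.insert abbr (matched.getD abbr "")) PySem.Dict.empty
  final.items

-- ===== PORT B =====
def pvPunctB : List Char := "!()-[]{};:'\"\\,<>./?@#$%^&*_~".toList

def find_and_filter_abbreviations_alt (abbreviations_dict : List (String × String)) (sentence : String) : List (String × String) :=
  let D : PySem.Dict String String := ⟨abbreviations_dict⟩
  -- Source B: sentence.translate(str.maketrans('', '', punct)) — a translate with a delete-table only removes
  -- exactly the characters of the table, so it is ported exactly as a per-character filter
  let words := PySem.Str.split₀ (String.ofList (sentence.toList.filter (fun c => !(pvPunctB.contains c))))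
  let cands := PySem.List.dedup (words.filter (fun w => D.contains w))
  let sorted := PySem.List.sorted cands PySem.Str.len true
  let kept := sorted.foldl (fun k a =>
      if k.any (fun b => PySem.Str.len a < PySem.Str.len b && PySem.Str.isIn a b) then k else k ++ [a])
    ([] : List String)
  (kept.foldl (fun f a => f.insert a (D.getD a "")) (PySem.Dict.empty : PySem.Dict String String)).items

-- ===== PRECONDITION & SPEC =====
def Spec_find_and_filter_abbreviations (abbreviations_dict : List (String × String)) (sentence : String) (out : List (String × String)) : Prop := out = find_and_filter_abbreviations_alt abbreviations_dict sentence
instance (abbreviations_dict : List (String × String)) (sentence : String) (out : List (String × String)) : Decidable (Spec_find_and_filter_abbreviations abbreviations_dict sentence out) := by unfold Spec_find_and_filter_abbreviations; infer_instance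

-- ===== CLAIM (what is proved, stated in full; the proofs are below) =====
def Claim_equal_find_and_filter_abbreviations : Prop := ∀ (abbreviations_dict : List (String × String)) (sentence : String), Dom_find_and_filter_abbreviations abbreviations_dict sentence → Spec_find_and_filter_abbreviations abbreviations_dict sentence (find_and_filter_abbreviations abbreviations_dict sentence)

-- ===== LEMMAS AND PROOFS =====

-- "a is a strictly shorter substring of b": the domination test B's sweep uses
def pvStrict (a b : String) : Bool := PySem.Str.len a < PySem.Str.len b && PySem.Str.isIn a b

theorem pvStrict_def (a b : String) :
    (PySem.Str.len a < PySem.Str.len b && PySem.Str.isIn a b) = pvStrict a b := rfl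

-- replace.go with a single-char pattern and empty replacement is filter
theorem pv_go_filter (c : Char) : ∀ (fuel : Nat) (l acc : List Char), l.length ≤ fuel →
    PySem.Chars.replace.go [c] [] fuel l acc = acc.reverse ++ l.filter (fun x => x != c) := by
  intro fuel
  induction fuel with
  | zero =>
    intro l acc h
    have : l = [] := List.eq_nil_of_length_eq_zero (Nat.le_zero.mp h)
    subst this
    simp [PySem.Chars.replace.go]
  | succ n ih =>
    intro l acc h
    cases l with
    | nil => simp [PySem.Chars.replace.go]
    | cons x t =>
      by_cases hx : x = c
      · subst hx
        have : List.isPrefixOf [x] (x :: t) = true := by simp [List.isPrefixOf]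
        simp only [PySem.Chars.replace.go, this, if_pos]
        rw [ih]
        · simp
        · simpa using Nat.le_of_succ_le_succ h
      · have : List.isPrefixOf [c] (x :: t) = false := by
          simp [List.isPrefixOf]; exact fun hh => absurd hh.symm hx
        simp only [PySem.Chars.replace.go, this, if_neg, Bool.false_eq_true, not_false_iff]
        rw [ih]
        · simp [hx]
        · simpa using Nat.le_of_succ_le_succ h

theorem pv_replace_single (c : Char) (l : List Char) :
    PySem.Chars.replace l [c] [] = l.filter (fun x => x != c) := by
  have := pv_go_filter c l.length l [] (le_refl _)
  simpa [PySem.Chars.replace] using this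

-- A's punctuation-removal foldl is B's single filter pass
theorem pv_foldl_replace_toList (ps : List Char) : ∀ (t : String),
    (ps.foldl (fun t c => PySem.Str.replace t (String.ofList [c]) "") t).toList
      = t.toList.filter (fun x => !(ps.contains x)) := by
  induction ps with
  | nil => intro t; simp
  | cons c ps ih =>
    intro t
    rw [List.foldl_cons, ih, PySem.Str.toList_replace]
    simp only [String.toList_ofList]
    have he : ("" : String).toList = [] := rfl
    rw [he, pv_replace_single, List.filter_filter]
    apply List.filter_congr
    intro x _
    by_cases h1 : x = c <;> by_cases h2 : x ∈ ps <;> simp [h1, h2, bne]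

-- a guarded foldl is a foldl over the filtered list
theorem pv_foldl_guard_filter {α β : Type} (p : α → Bool) (g : β → α → β) :
    ∀ (l : List α) (init : β),
      l.foldl (fun s x => if p x then g s x else s) init = (l.filter p).foldl g init := by
  intro l
  induction l with
  | nil => intro init; rfl
  | cons x t ih => intro init; by_cases h : p x = true <;> simp [h, ih]

theorem pv_foldl_guard_filter_neg {α β : Type} (p : α → Bool) (g : β → α → β) :
    ∀ (l : List α) (init : β),
      l.foldl (fun s x => if p x then s else g s x) init = (l.filter (fun x => !p x)).foldl g init := by
  intro l
  induction l with
  | nil => intro init; rfl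
  | cons x t ih => intro init; by_cases h : p x = true <;> simp [h, ih]

-- lookups in the matched dict are lookups in the abbreviation dict
theorem pv_matched_getD (D : PySem.Dict String String) (l : List String) : ∀ a : String,
    (l.foldl (fun m w => m.insert w (D.getD w "")) PySem.Dict.empty).getD a ""
      = if a ∈ l then D.getD a "" else "" := by
  induction l using List.reverseRecOn with
  | nil => intro a; simp [PySem.Dict.getD_empty]
  | append_singleton t w ih =>
    intro a
    rw [List.foldl_append, List.foldl_cons, List.foldl_nil, PySem.Dict.getD_insert]
    by_cases h : a = w
    · subst h; simp
    · simp [h, ih a]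

-- A's pair test equals B's length-guarded test
theorem pv_cond_iff (a b : String) :
    (PySem.Str.isIn a b && a != b) = pvStrict a b := by
  unfold pvStrict
  by_cases h : PySem.Str.isIn a b = true
  · rw [h, Bool.true_and, Bool.and_true]
    have hinf : a.toList <:+: b.toList := (PySem.Str.isIn_iff_infix a b).mp h
    by_cases he : a = b
    · subst he
      simp only [bne_self_eq_false, lt_self_iff_false, decide_false]
    · have hlt : a.toList.length < b.toList.length := by
        rcases Nat.lt_or_ge a.toList.length b.toList.length with h' | h'
        · exact h'
        · exfalso
          have heq : a.toList = b.toList :=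
            List.IsInfix.eq_of_length hinf (Nat.le_antisymm hinf.length_le h')
          have : a = b := by
            have := congrArg String.ofList heq
            simpa using this
          exact he this
      have hl2 : a.length < b.length := by simpa using hlt
      simp [bne, he, hl2]
  · rw [Bool.not_eq_true] at h
    rw [h, Bool.false_and, Bool.and_false]

theorem pv_dom_irrefl (a : String) : pvStrict a a = false := by
  simp [pvStrict]

theorem pv_dom_trans {a o p : String} (h1 : pvStrict a o = true) (h2 : pvStrict o p = true) :
    pvStrict a p = true := by
  unfold pvStrict at *
  simp only [Bool.and_eq_true, decide_eq_true_eq, PySem.Str.isIn_iff_infix] at *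
  exact ⟨lt_trans h1.1 h2.1, h1.2.trans h2.2⟩

-- every dominated string has an undominated dominator
theorem pv_exists_max_dom (T : List String) : ∀ (n : Nat) (o : String),
    (T.filter (fun x => pvStrict o x)).length ≤ n → o ∈ T →
    ∃ y ∈ T, (y = o ∨ pvStrict o y = true) ∧ T.any (fun x => pvStrict y x) = false := by
  intro n
  induction n with
  | zero =>
    intro o hlen ho
    refine ⟨o, ho, Or.inl rfl, ?_⟩
    rw [List.any_eq_false]
    intro x hx hdom
    have : x ∈ T.filter (fun x => pvStrict o x) := List.mem_filter.mpr ⟨hx, hdom⟩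
    rw [List.length_eq_zero_iff.mp (Nat.le_zero.mp hlen)] at this
    simp at this
  | succ n ih =>
    intro o hlen ho
    by_cases hd : T.any (fun x => pvStrict o x) = true
    · obtain ⟨p, hp, hdp⟩ := List.any_eq_true.mp hd
      have hsub : T.filter (fun x => pvStrict p x)
          = (T.filter (fun x => pvStrict o x)).filter (fun x => pvStrict p x) := by
        rw [List.filter_filter]
        apply List.filter_congr
        intro x _
        by_cases hx : pvStrict p x = true
        · simp [hx, pv_dom_trans hdp hx]
        · rw [Bool.not_eq_true] at hx; simp [hx]
      have hlt : (T.filter (fun x => pvStrict p x)).length ≤ n := by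
        rw [hsub]
        have hmem : p ∈ T.filter (fun x => pvStrict o x) := List.mem_filter.mpr ⟨hp, hdp⟩
        have : ((T.filter (fun x => pvStrict o x)).filter (fun x => pvStrict p x)).length
            < (T.filter (fun x => pvStrict o x)).length := by
          apply List.length_filter_lt_length_iff_exists.mpr
          exact ⟨p, hmem, by simp [pv_dom_irrefl]⟩
        omega
      obtain ⟨y, hy, hcase, hund⟩ := ih p hlt hp
      refine ⟨y, hy, Or.inr ?_, hund⟩
      rcases hcase with rfl | hpy
      · exact hdp
      · exact pv_dom_trans hdp hpy
    · exact ⟨o, ho, Or.inl rfl, Bool.not_eq_true _ |>.mp hd⟩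

-- B's maximal-element sweep computes exactly "not dominated by anything in T"
theorem pv_sweep (T : List String)
    (hpw : T.Pairwise (fun a b => PySem.Str.len b ≤ PySem.Str.len a)) :
    ∀ (S F : List String), T = F ++ S →
      S.foldl (fun k a => if k.any (fun b => pvStrict a b) then k else k ++ [a])
          (F.filter (fun a => !(T.any (fun b => pvStrict a b))))
        = T.filter (fun a => !(T.any (fun b => pvStrict a b))) := by
  intro S
  induction S with
  | nil => intro F hF; rw [List.foldl_nil, hF, List.append_nil]
  | cons a S' ih =>
    intro F hF
    rw [List.foldl_cons]
    have hkey : (F.filter (fun x => !(T.any (fun b => pvStrict x b)))).any (fun b => pvStrict a b)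
        = T.any (fun b => pvStrict a b) := by
      by_cases hT : T.any (fun b => pvStrict a b) = true
      · rw [hT]
        obtain ⟨o, hoT, hdo⟩ := List.any_eq_true.mp hT
        obtain ⟨y, hyT, hcase, hund⟩ := pv_exists_max_dom T _ o (le_refl _) hoT
        have hday : pvStrict a y = true := by
          rcases hcase with rfl | hoy
          · exact hdo
          · exact pv_dom_trans hdo hoy
        have hyF : y ∈ F := by
          rcases (by rw [hF] at hyT; exact List.mem_append.mp hyT : y ∈ F ∨ y ∈ a :: S') with h | h
          · exact h
          · exfalso
            rcases List.mem_cons.mp h with rfl | hyS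
            · rw [pv_dom_irrefl] at hday; exact absurd hday (by simp)
            · have hrel : PySem.Str.len y ≤ PySem.Str.len a := by
                have hp2 := hpw
                rw [hF] at hp2
                have h2 := (List.pairwise_append.mp hp2).2.1
                exact (List.pairwise_cons.mp h2).1 y hyS
              have hlt : PySem.Str.len a < PySem.Str.len y := by
                have hd := hday; unfold pvStrict at hd
                simpa using (Bool.and_eq_true _ _ |>.mp hd).1
              omega
        apply List.any_eq_true.mpr
        exact ⟨y, List.mem_filter.mpr ⟨hyF, by simp [hund]⟩, hday⟩
      · rw [Bool.not_eq_true] at hT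
        rw [hT, List.any_eq_false]
        intro x hx hdom
        have hxT : x ∈ T := by
          rw [hF]; exact List.mem_append.mpr (Or.inl (List.mem_filter.mp hx).1)
        exact absurd hdom (by simpa using List.any_eq_false.mp hT x hxT)
    rw [hkey]
    by_cases hc : T.any (fun b => pvStrict a b) = true
    · rw [hc, if_pos rfl]
      have hih := ih (F ++ [a]) (by rw [hF]; simp)
      rw [← hih]
      congr 1
      rw [List.filter_append]
      simp [hc]
    · rw [Bool.not_eq_true] at hc
      rw [hc, if_neg (by simp)]
      have hih := ih (F ++ [a]) (by rw [hF]; simp)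
      rw [← hih]
      congr 1
      rw [List.filter_append]
      simp [hc]

-- items of an insert-fold over distinct fresh keys
theorem pv_items_map (K : List String) (hnd : K.Nodup) (v : String → String) :
    (List.foldl (fun f a => f.insert a (v a)) (PySem.Dict.empty : PySem.Dict String String) K).items
      = K.map (fun a => (a, v a)) := by
  have h := PySem.Dict.items_foldl_insert_fresh (κ := String) (ν := String) (β := String)
      K (fun a => a) v PySem.Dict.empty (by intro a _; simp) (by simpa using hnd)
  simpa using h

-- A's dict-comprehension step written as a guarded insert
theorem pv_match_step (D : PySem.Dict String String) :
    (fun (m : PySem.Dict String String) w =>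
        match D.get? w with | some v => m.insert w v | none => m)
      = fun m w => if D.contains w then m.insert w (D.getD w "") else m := by
  funext m w
  cases hg : D.get? w with
  | none => simp [PySem.Dict.contains_eq_isSome_get?, hg]
  | some v => simp [PySem.Dict.contains_eq_isSome_get?, hg, PySem.Dict.getD_of_get?_eq_some D "" hg]

-- the common normal form of both programs
def pvCanon (abbreviations_dict : List (String × String)) (sentence : String) : List (String × String) :=
  let D : PySem.Dict String String := ⟨abbreviations_dict⟩
  let words := (PySem.Chars.split₀ (sentence.toList.filter (fun x => !(pvPunctA.contains x)))).map String.ofList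
  let L := words.filter (fun w => D.contains w)
  let SS := PySem.List.sorted (PySem.Set.ofList L) PySem.Str.len true
  (SS.filter (fun a => !(SS.any (fun b => pvStrict a b)))).map (fun a => (a, D.getD a ""))

theorem pv_A_tail (Dm : PySem.Dict String String) (SS : List String) (hnd : SS.Nodup) :
    (SS.foldl (fun f abbr =>
        if SS.any (fun other => pvStrict abbr other) then f
        else f.insert abbr (Dm.getD abbr "")) (PySem.Dict.empty : PySem.Dict String String)).items
      = (SS.filter (fun a => !(SS.any (fun b => pvStrict a b)))).map (fun a => (a, Dm.getD a "")) := by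
  have h := pv_foldl_guard_filter_neg (fun abbr => SS.any (fun other => pvStrict abbr other))
      (fun (f : PySem.Dict String String) abbr => f.insert abbr (Dm.getD abbr "")) SS PySem.Dict.empty
  rw [h]
  exact pv_items_map _ (hnd.filter _) _

theorem pv_B_tail (D : PySem.Dict String String) (SS : List String)
    (hpw : SS.Pairwise (fun a b => PySem.Str.len b ≤ PySem.Str.len a)) (hnd : SS.Nodup) :
    (List.foldl (fun f a => f.insert a (D.getD a ""))
        (PySem.Dict.empty : PySem.Dict String String)
        (List.foldl (fun k a => if k.any (fun b => pvStrict a b) then k else k ++ [a]) [] SS)).items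
      = (SS.filter (fun a => !(SS.any (fun b => pvStrict a b)))).map (fun a => (a, D.getD a "")) := by
  have hs := pv_sweep SS hpw SS [] (List.nil_append SS).symm
  simp only [List.filter_nil] at hs
  rw [hs]
  exact pv_items_map _ (hnd.filter _) _

theorem pv_A_canon (d : List (String × String)) (s : String) :
    find_and_filter_abbreviations d s = pvCanon d s := by
  unfold find_and_filter_abbreviations pvCanon pvPreprocess
  simp only [if_false, Bool.false_eq_true]
  rw [pv_match_step, pv_foldl_guard_filter]
  have hwords : PySem.Str.split₀
      (pvPunctA.foldl (fun t c => PySem.Str.replace t (String.ofList [c]) "") s)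
      = (PySem.Chars.split₀ (s.toList.filter (fun x => !(pvPunctA.contains x)))).map String.ofList := by
    rw [PySem.Str.split₀, pv_foldl_replace_toList]
  rw [hwords]
  rw [PySem.Dict.keys_foldl_insert _ (fun _ w => (⟨d⟩ : PySem.Dict String String).getD w "")]
  rw [PySem.Dict.keys_empty, PySem.Set.update_nil_left]
  simp only [pv_cond_iff]
  have hnd : (PySem.List.sorted (PySem.Set.ofList
      (((PySem.Chars.split₀ (s.toList.filter (fun x => !(pvPunctA.contains x)))).map String.ofList).filter
        (fun w => (⟨d⟩ : PySem.Dict String String).contains w))) PySem.Str.len true).Nodup :=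
    ((PySem.List.sorted_perm _ _ _).nodup_iff).mpr (PySem.Set.nodup_ofList _)
  rw [pv_A_tail _ _ hnd]
  apply List.map_congr_left
  intro a ha
  have haS := (List.mem_filter.mp ha).1
  have haL : a ∈ (((PySem.Chars.split₀ (s.toList.filter (fun x => !(pvPunctA.contains x)))).map String.ofList).filter
      (fun w => (⟨d⟩ : PySem.Dict String String).contains w)) := by
    have := ((PySem.List.sorted_perm _ _ _).mem_iff).mp haS
    exact (PySem.Set.mem_ofList _ _).mp this
  rw [pv_matched_getD, if_pos haL]

theorem pv_B_canon (d : List (String × String)) (s : String) :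
    find_and_filter_abbreviations_alt d s = pvCanon d s := by
  have hB : pvPunctB = pvPunctA := by decide
  unfold find_and_filter_abbreviations_alt pvCanon
  simp only [hB, PySem.Str.split₀, String.toList_ofList, PySem.List.dedup, pvStrict_def]
  exact pv_B_tail _ _ (PySem.List.sorted_pairwise_rev _ _)
    (((PySem.List.sorted_perm _ _ _).nodup_iff).mpr (PySem.Set.nodup_ofList _))

-- ===== VERDICT (by name: the statement is the Claim_ definition above) =====
theorem find_and_filter_abbreviations_spec : Claim_equal_find_and_filter_abbreviations := by
  intro d s _
  unfold Spec_find_and_filter_abbreviations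
  rw [pv_A_canon, pv_B_canon]
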